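-- pv_equiv track=rewrite | github.com/JurkoMurko/Business-Expense-Calc | Taxes python html version/Other/variations/csv_accouting year sort.py | parse
-- ===== SOURCE A (Python) =====
-- def parse(stuff):
--     for word in remove_words:
--         stuff = stuff.replace(word, "")
--
--     new = ''
--     stuff = stuff.strip(''.join([str(i) for i in range(0, 10)] + [*r"\ /#*"]))
--     for letter in stuff:
--         if letter not in remove_letters:
--             new += letter
--         else:
--             return new
--     return new
--
-- remove_words = ["SUN PRAIRIE", " WI",'MADISON', ' MI', 'THE ', 'OF', 'POS DEBIT', 'TST*', 'SQ']
--
-- remove_letters = [str(i) for i in range(0, 10)] + [*r"\/#*"]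
-- ===== SOURCE B (Python) =====
-- remove_words = ["SUN PRAIRIE", " WI", 'MADISON', ' MI', 'THE ', 'OF', 'POS DEBIT', 'TST*', 'SQ']
--
-- _stops = "0123456789\\/#*"
--
-- def parse(stuff):
--     for word in remove_words:
--         stuff = stuff.replace(word, "")
--     stuff = stuff.strip("0123456789\\ /#*")
--     cut = len(stuff)
--     for ch in _stops:
--         i = stuff.find(ch)
--         if 0 <= i < cut:
--             cut = i
--     return stuff[:cut]
-- ===== Notes on version B (the rewrite author's own statement) =====
-- stated objective: faster
-- what changed: Replaces A's character-by-character accumulation loop with an early return by computing the cut position in one shot (minimum str.find index over the 14 stop characters) and slicing the prefix before it.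
import Mathlib
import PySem

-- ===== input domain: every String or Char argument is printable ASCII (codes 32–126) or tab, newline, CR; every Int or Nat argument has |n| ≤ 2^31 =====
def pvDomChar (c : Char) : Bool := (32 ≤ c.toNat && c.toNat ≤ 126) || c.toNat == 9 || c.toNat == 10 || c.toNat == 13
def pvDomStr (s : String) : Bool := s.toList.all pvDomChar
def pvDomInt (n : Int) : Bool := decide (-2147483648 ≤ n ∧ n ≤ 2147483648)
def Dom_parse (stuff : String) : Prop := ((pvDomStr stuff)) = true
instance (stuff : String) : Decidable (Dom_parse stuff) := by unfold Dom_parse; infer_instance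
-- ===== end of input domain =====

-- B replaces A's char-by-char accumulation loop (early return at a stop char) by computing
-- the cut position as the minimum str.find index over the stop characters and slicing.

-- ===== PORT A =====
def pvRemoveWords : List String :=
  ["SUN PRAIRIE", " WI", "MADISON", " MI", "THE ", "OF", "POS DEBIT", "TST*", "SQ"]

def pvRemoveLetters : List Char :=
  ['0','1','2','3','4','5','6','7','8','9','\\','/','#','*']

-- A's 'for letter in stuff: if letter not in remove_letters: new += letter else: return new'
def pvALoop : List Char → String → String
  | [], new => new
  | c :: rest, new =>
      if pvRemoveLetters.contains c then new else pvALoop rest (new.push c)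

def parse (stuff : String) : String :=
  let s1 := pvRemoveWords.foldl (fun s w => PySem.Str.replace s w "") stuff
  let s2 := PySem.Str.stripChars s1 "0123456789\\ /#*"
  pvALoop s2.toList ""

-- ===== PORT B =====
def parse_alt (stuff : String) : String :=
  let s1 := pvRemoveWords.foldl (fun s w => PySem.Str.replace s w "") stuff
  let s2 := PySem.Str.stripChars s1 "0123456789\\ /#*"
  let cut := pvRemoveLetters.foldl
      (fun cut ch =>
        let i := PySem.Str.find s2 (String.singleton ch)
        if 0 ≤ i ∧ i < cut then i else cut)
      ((PySem.Str.len s2 : Int))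
  PySem.Str.slice s2 none (some cut)

-- ===== PRECONDITION & SPEC =====
def Spec_parse (stuff : String) (out : String) : Prop := out = parse_alt stuff
instance (stuff : String) (out : String) : Decidable (Spec_parse stuff out) := by unfold Spec_parse; infer_instance

-- ===== CLAIM (what is proved, stated in full; the proofs are below) =====
def Claim_equal_parse : Prop := ∀ (stuff : String), Dom_parse stuff → Spec_parse stuff (parse stuff)

-- ===== LEMMAS AND PROOFS =====

-- the predicate "letter is kept" in A's loop
def pvKeep (c : Char) : Bool := !pvRemoveLetters.contains c

theorem take_takeWhile (p : Char → Bool) (l : List Char) :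
    l.take (l.takeWhile p).length = l.takeWhile p := by
  induction l with
  | nil => simp
  | cons a t ih =>
    by_cases h : p a = true
    · simp [h, ih]
    · simp [h]

theorem takeWhile_stop (p : Char → Bool) (l : List Char) (h : (l.takeWhile p).length < l.length) :
    p (l[(l.takeWhile p).length]) = false := by
  induction l with
  | nil => simp at h
  | cons a t ih =>
    by_cases hp : p a = true
    · simp [hp] at h ⊢
      exact ih h
    · simp [hp]

theorem takeWhile_sat (p : Char → Bool) (l : List Char) (j : Nat) (h : j < (l.takeWhile p).length) :
    p ((l.takeWhile p)[j]) = true :=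
  List.mem_takeWhile_imp (List.getElem_mem h)

theorem singleton_prefix_iff (ch : Char) (t : List Char) : [ch] <+: t ↔ t.head? = some ch := by
  cases t with
  | nil => simp
  | cons a t => simp [List.cons_prefix_cons, eq_comm]

theorem pvALoop_toList (l : List Char) (new : String) :
    (pvALoop l new).toList = new.toList ++ l.takeWhile pvKeep := by
  induction l generalizing new with
  | nil => simp [pvALoop]
  | cons c t ih =>
    by_cases h : c ∈ pvRemoveLetters
    · simp [pvALoop, h, pvKeep]
    · rw [show pvALoop (c :: t) new = pvALoop t (new.push c) by simp [pvALoop, h]]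
      rw [ih]
      simp [pvKeep, h]

theorem fold_min_le (v : Char → Int) (cs : List Char) (a : Int) :
    cs.foldl (fun cut ch => if 0 ≤ v ch ∧ v ch < cut then v ch else cut) a ≤ a := by
  induction cs generalizing a with
  | nil => simp
  | cons ch t ih =>
    simp only [List.foldl_cons]
    split_ifs with h
    · exact le_trans (ih (v ch)) (le_of_lt h.2)
    · exact ih a

theorem fold_min_ge (v : Char → Int) (cs : List Char) (a k : Int) (ha : k ≤ a)
    (h : ∀ ch ∈ cs, 0 ≤ v ch → k ≤ v ch) :
    k ≤ cs.foldl (fun cut ch => if 0 ≤ v ch ∧ v ch < cut then v ch else cut) a := by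
  induction cs generalizing a with
  | nil => simpa
  | cons ch t ih =>
    simp only [List.foldl_cons]
    split_ifs with hc
    · exact ih (v ch) (h ch (List.mem_cons_self) hc.1) (fun c hm => h c (List.mem_cons_of_mem _ hm))
    · exact ih a ha (fun c hm => h c (List.mem_cons_of_mem _ hm))

theorem fold_min_le_of_mem (v : Char → Int) (cs : List Char) (a : Int) (ch : Char)
    (hm : ch ∈ cs) (h0 : 0 ≤ v ch) :
    cs.foldl (fun cut ch => if 0 ≤ v ch ∧ v ch < cut then v ch else cut) a ≤ v ch := by
  induction cs generalizing a with
  | nil => simp at hm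
  | cons c t ih =>
    simp only [List.foldl_cons]
    rcases List.mem_cons.mp hm with rfl | hm'
    · split_ifs with hc
      · exact fold_min_le v t (v ch)
      · have : a ≤ v ch := by
          rcases lt_or_ge (v ch) a with hlt | hge
          · exact absurd ⟨h0, hlt⟩ hc
          · exact hge
        exact le_trans (fold_min_le v t a) this
    · split_ifs with hc
      · exact ih (v c) hm'
      · exact ih a hm'

-- the computed cut equals the length of the kept prefix
theorem fold_cut_eq (L : List Char) :
    pvRemoveLetters.foldl
      (fun cut ch =>
        if 0 ≤ PySem.Chars.find L [ch] ∧ PySem.Chars.find L [ch] < cut then PySem.Chars.find L [ch] else cut)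
      (L.length : Int)
    = ((L.takeWhile pvKeep).length : Int) := by
  set v : Char → Int := fun ch => PySem.Chars.find L [ch] with hv
  set k : Nat := (L.takeWhile pvKeep).length with hk
  have hkle : k ≤ L.length := by
    rw [hk]; exact (List.takeWhile_prefix pvKeep).length_le
  have hidx : ∀ ch, 0 ≤ v ch → L[(v ch).toNat]? = some ch := by
    intro ch h0
    have hs := (PySem.Chars.find_spec (s := L) (sub := [ch]) h0).1
    rw [singleton_prefix_iff] at hs
    rwa [List.head?_drop] at hs
  refine le_antisymm ?_ ?_
  · -- fold result ≤ k
    by_cases hcase : k < L.length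
    · have hch : pvKeep (L[k]) = false := takeWhile_stop pvKeep L (hk ▸ hcase)
      set ch := L[k] with hch'
      have hmem : ch ∈ pvRemoveLetters := by
        simpa [pvKeep] using hch
      have hin : ch ∈ L := List.getElem_mem hcase
      have h0 : 0 ≤ v ch := by
        rw [hv]
        rw [PySem.Chars.find_nonneg_iff]
        exact (List.singleton_infix_iff ch L).mpr hin
      have hle : v ch ≤ (k : Int) := by
        by_contra hgt
        have hspec := (PySem.Chars.find_spec (s := L) (sub := [ch]) h0).2
        have hkv : k < (v ch).toNat := by omega
        have := hspec k hkv
        rw [singleton_prefix_iff, List.head?_drop] at this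
        exact this (by simp [hch'])
      exact le_trans (fold_min_le_of_mem v pvRemoveLetters _ ch hmem h0) hle
    · have hkl : k = L.length := le_antisymm hkle (le_of_not_gt hcase)
      calc _ ≤ (L.length : Int) := fold_min_le v pvRemoveLetters _
        _ = (k : Int) := by rw [hkl]
  · -- k ≤ fold result
    refine fold_min_ge v pvRemoveLetters _ _ (by exact_mod_cast hkle) ?_
    intro ch hmem h0
    by_contra hlt
    have hjk : (v ch).toNat < k := by omega
    have h1 : L[(v ch).toNat]? = some ch := hidx ch h0
    have hlen : (v ch).toNat < (L.takeWhile pvKeep).length := by omega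
    have hs := takeWhile_sat pvKeep L (v ch).toNat hlen
    have hsome : (L.takeWhile pvKeep)[(v ch).toNat]? = some ch := by
      rw [← take_takeWhile pvKeep L]
      rw [List.getElem?_take_of_lt (by omega)]
      exact h1
    have hgeq : (L.takeWhile pvKeep)[(v ch).toNat]'hlen = ch := by
      have h4 := List.getElem?_eq_getElem (l := L.takeWhile pvKeep) (i := (v ch).toNat) hlen
      rw [h4] at hsome
      exact Option.some.inj hsome
    rw [hgeq] at hs
    simp [pvKeep] at hs
    exact hs hmem

theorem pvTail_eq (s : String) :
    pvALoop s.toList "" =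
      PySem.Str.slice s none (some (pvRemoveLetters.foldl
        (fun cut ch =>
          let i := PySem.Str.find s (String.singleton ch)
          if 0 ≤ i ∧ i < cut then i else cut)
        (PySem.Str.len s))) := by
  have hfind : (fun (cut : Int) (ch : Char) =>
        let i := PySem.Str.find s (String.singleton ch)
        if 0 ≤ i ∧ i < cut then i else cut)
      = (fun (cut : Int) (ch : Char) =>
        if 0 ≤ PySem.Chars.find s.toList [ch] ∧ PySem.Chars.find s.toList [ch] < cut
        then PySem.Chars.find s.toList [ch] else cut) := by
    funext cut ch
    simp [PySem.Str.find_eq]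
  have hlen : PySem.Str.len s = (s.toList.length : Int) := by
    simp [PySem.Str.len_eq]
  rw [hfind, hlen, fold_cut_eq s.toList]
  apply String.toList_inj.mp
  rw [pvALoop_toList]
  simp [PySem.Str.toList_slice, PySem.Chars.slice_eq_listSlice, PySem.List.slice_to_natCast,
    take_takeWhile]

-- ===== VERDICT (by name: the statement is the Claim_ definition above) =====
theorem parse_spec : Claim_equal_parse := by
  intro stuff _
  unfold Spec_parse parse parse_alt
  exact pvTail_eq _
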